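-- pv_equiv track=rewrite | github.com/mouredev/roadmap-retos-programacion | Roadmap/39 - BATMAN DAY/python/Gordo-Master.py | threat_to_city
-- ===== SOURCE A (Python) =====
-- def is_center(coord: tuple, matrix: list, size = 3):
--     offset = size // 2
--     if coord[0] in range(0+offset, (len(matrix)-offset)):
--         if coord[1] in range(0+offset, (len(matrix[0])-offset)):
--             return True
--     return False
--
-- def get_center_zone(matrix, size = 3):
--     zone = []
--     for i in range(len(matrix)):
--         for j in range(len(matrix[i])):
--             if is_center((i,j), matrix, size):
--                 zone.append((i,j))
--
--     return zone
--
-- def get_threat_level(mini_matrix):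
--     threat_level = 0
--     for row in mini_matrix:
--         threat_level += sum(row)
--     return threat_level
--
-- def get_submatrix(matrix, center_x, center_y, size = 3):
--     offset = size // 2
--     submatrix = []
--     for i in range(center_x - offset, center_x + offset + 1):
--         row = []
--         for j in range(center_y - offset, center_y + offset + 1):
--             row.append(matrix[i][j])
--         submatrix.append(row)
--     return submatrix
--
-- def threat_to_city(matrix):
--     center_zone = get_center_zone(matrix,3)
--     emergency_zones = []
--     for zone in center_zone:
--         submatrix = get_submatrix(matrix,zone[0],zone[1])
--         threat_level = get_threat_level(submatrix)
--         x,y = zone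
--         z = threat_level
--         emergency_zones.append((x,y,z))
--
--     return emergency_zones
-- ===== SOURCE B (Python) =====
-- def threat_to_city(matrix):
--     rows = len(matrix)
--     cols = len(matrix[0]) if matrix else 0
--     if rows < 3 or cols < 3:
--         return []
--     # horizontal 3-sums per row, then each 3x3 window is a sum of three of them
--     hs = [[row[j] + row[j + 1] + row[j + 2] for j in range(cols - 2)] for row in matrix]
--     return [(i, j, hs[i - 1][j - 1] + hs[i][j - 1] + hs[i + 1][j - 1])
--             for i in range(1, rows - 1) for j in range(1, cols - 1)]
-- ===== Notes on version B (the rewrite author's own statement) =====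
-- stated objective: faster
-- what changed: B drops A's center-candidate scan and per-center 3x3 submatrix construction and instead precomputes one table of horizontal 3-sums per row, so each interior cell's threat level is the sum of three table lookups.
-- outside the precondition, e.g. on threat_to_city([[1, 1, 1], [], [1, 1, 1]]): A returns [], B raises IndexError
import Mathlib
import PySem

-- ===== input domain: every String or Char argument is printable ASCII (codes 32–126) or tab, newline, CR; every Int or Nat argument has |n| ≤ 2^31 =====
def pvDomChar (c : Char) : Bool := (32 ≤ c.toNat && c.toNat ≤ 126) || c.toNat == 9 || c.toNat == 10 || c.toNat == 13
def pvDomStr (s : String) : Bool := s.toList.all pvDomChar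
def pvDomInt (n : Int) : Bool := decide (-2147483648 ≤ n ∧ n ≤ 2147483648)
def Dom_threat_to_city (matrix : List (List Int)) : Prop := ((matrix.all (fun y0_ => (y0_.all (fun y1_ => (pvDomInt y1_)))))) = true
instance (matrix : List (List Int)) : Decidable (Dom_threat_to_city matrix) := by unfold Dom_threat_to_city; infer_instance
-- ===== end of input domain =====

-- B replaces A's per-center 3x3 submatrix construction by precomputed horizontal
-- 3-sums per row, so each result entry is a sum of three table lookups (objective:
-- constant-factor speedup; return value only, neither program mutates its argument).

-- ===== PORT A =====
def pvIsCenter (coord : Int × Int) (matrix : List (List Int)) : Bool :=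
  let offset : Int := PySem.Int.floordiv 3 2
  if (PySem.List.pyRange (0 + offset) (PySem.List.len matrix - offset) 1).contains coord.1 then
    if (PySem.List.pyRange (0 + offset) (PySem.List.len (PySem.List.pyGetD matrix 0 []) - offset) 1).contains coord.2 then
      true
    else false
  else false

def pvGetCenterZone (matrix : List (List Int)) : List (Int × Int) :=
  (PySem.List.pyRange 0 (PySem.List.len matrix) 1).foldl (fun zone i =>
    (PySem.List.pyRange 0 (PySem.List.len (PySem.List.pyGetD matrix i [])) 1).foldl (fun zone j =>
      if pvIsCenter (i, j) matrix then zone ++ [(i, j)] else zone) zone) []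

def pvGetThreatLevel (mini : List (List Int)) : Int :=
  mini.foldl (fun t row => t + row.sum) 0

def pvGetSubmatrix (matrix : List (List Int)) (cx cy : Int) : List (List Int) :=
  let offset : Int := PySem.Int.floordiv 3 2
  (PySem.List.pyRange (cx - offset) (cx + offset + 1) 1).foldl (fun sub i =>
    sub ++ [(PySem.List.pyRange (cy - offset) (cy + offset + 1) 1).foldl (fun row j =>
      row ++ [PySem.List.pyGetD (PySem.List.pyGetD matrix i []) j 0]) []]) []

def threat_to_city (matrix : List (List Int)) : List (Int × Int × Int) :=
  let centerZone := pvGetCenterZone matrix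
  centerZone.foldl (fun ez zone =>
    let submatrix := pvGetSubmatrix matrix zone.1 zone.2
    let threatLevel := pvGetThreatLevel submatrix
    ez ++ [(zone.1, zone.2, threatLevel)]) []

-- ===== PORT B =====
def threat_to_city_alt (matrix : List (List Int)) : List (Int × Int × Int) :=
  let rows := matrix.length
  let cols := (matrix.headD []).length
  if rows < 3 ∨ cols < 3 then []
  else
    let hs := matrix.map (fun row =>
      (List.range (cols - 2)).map (fun j => row.getD j 0 + row.getD (j + 1) 0 + row.getD (j + 2) 0))
    (List.range' 1 (rows - 2)).flatMap (fun (i : Nat) =>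
      (List.range' 1 (cols - 2)).map (fun (j : Nat) =>
        ((i : Int), (j : Int),
          (hs.getD (i - 1) []).getD (j - 1) 0 + (hs.getD i []).getD (j - 1) 0 +
            (hs.getD (i + 1) []).getD (j - 1) 0)))

-- ===== PRECONDITION & SPEC =====
-- Pre_ excludes matrices with at least 3 rows whose first row has at least 3 columns
-- but in which some row is shorter than the first row: there A either raises
-- IndexError while building a 3x3 submatrix, or returns an empty result only because a too-short
-- row yields no candidate centers, and B's row-table construction itself raises
-- IndexError on exactly these inputs.
def Pre_threat_to_city (matrix : List (List Int)) : Prop :=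
  matrix.length < 3 ∨ (matrix.headD []).length < 3 ∨
    ∀ row ∈ matrix, (matrix.headD []).length ≤ row.length
instance (matrix : List (List Int)) : Decidable (Pre_threat_to_city matrix) := by
  unfold Pre_threat_to_city; infer_instance

def pvWitness_threat_to_city : List (List Int) := [[1, 2, 3], [4, 5, 6], [7, 8, 9]]

def Spec_threat_to_city (matrix : List (List Int)) (out : List (Int × Int × Int)) : Prop := out = threat_to_city_alt matrix
instance (matrix : List (List Int)) (out : List (Int × Int × Int)) : Decidable (Spec_threat_to_city matrix out) := by unfold Spec_threat_to_city; infer_instance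

-- ===== CLAIM (what is proved, stated in full; the proofs are below) =====
def Claim_equal_threat_to_city : Prop := ∀ (matrix : List (List Int)), Dom_threat_to_city matrix → Pre_threat_to_city matrix → Spec_threat_to_city matrix (threat_to_city matrix)

-- ===== LEMMAS AND PROOFS =====

-- is_center is exactly the interior test
theorem pvIsCenter_eq (i j : Int) (matrix : List (List Int)) :
    pvIsCenter (i, j) matrix =
      decide (1 ≤ i ∧ i < (matrix.length : Int) - 1 ∧ 1 ≤ j ∧ j < ((matrix.headD []).length : Int) - 1) := by
  have h1 : PySem.Int.floordiv 3 2 = 1 := by decide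
  have h2 : PySem.List.pyGetD matrix 0 [] = matrix.headD [] := by
    cases matrix <;> simp [PySem.List.pyGetD_zero]
  unfold pvIsCenter
  simp only [h1, h2, List.contains_eq_mem, PySem.List.len_eq, PySem.List.mem_pyRange_one,
    zero_add]
  split_ifs with hA hB
  all_goals simp at *
  all_goals omega

-- range(t, t+3) explicitly
theorem pyRange_three (t : Int) : PySem.List.pyRange t (t + 3) 1 = [t, t + 1, t + 2] := by
  rw [PySem.List.pyRange_one]
  have h : (t + 3 - t).toNat = 3 := by omega
  rw [h]; norm_num [List.range_succ]

-- filtering an initial range by an interval test yields the interval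
theorem filter_pyRange_interval (L a b : Int) (ha : 0 ≤ a) (hb : b ≤ L) :
    (PySem.List.pyRange 0 L 1).filter (fun j => decide (a ≤ j ∧ j < b)) =
      PySem.List.pyRange a b 1 := by
  by_cases hab : a ≤ b
  · have hL : a ≤ L := le_trans hab hb
    rw [PySem.List.pyRange_one_append 0 a L ha hL,
      PySem.List.pyRange_one_append a b L hab hb, List.filter_append, List.filter_append]
    have e1 : (PySem.List.pyRange 0 a 1).filter (fun j => decide (a ≤ j ∧ j < b)) = [] := by
      rw [List.filter_eq_nil_iff]
      intro x hx
      rw [PySem.List.mem_pyRange_one] at hx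
      simp; omega
    have e2 : (PySem.List.pyRange a b 1).filter (fun j => decide (a ≤ j ∧ j < b)) =
        PySem.List.pyRange a b 1 := by
      rw [List.filter_eq_self]
      intro x hx
      rw [PySem.List.mem_pyRange_one] at hx
      simp; omega
    have e3 : (PySem.List.pyRange b L 1).filter (fun j => decide (a ≤ j ∧ j < b)) = [] := by
      rw [List.filter_eq_nil_iff]
      intro x hx
      rw [PySem.List.mem_pyRange_one] at hx
      simp; omega
    rw [e1, e2, e3]; simp
  · rw [show PySem.List.pyRange a b 1 = [] from PySem.List.pyRange_one_eq_nil (by omega),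
      List.filter_eq_nil_iff]
    intro x hx
    simp; omega

-- the center zone is the interior rectangle
theorem centerZone_eq (matrix : List (List Int))
    (hR : 3 ≤ matrix.length)
    (hrow : ∀ row ∈ matrix, (matrix.headD []).length ≤ row.length) :
    pvGetCenterZone matrix =
      (PySem.List.pyRange 1 ((matrix.length : Int) - 1) 1).flatMap (fun i =>
        (PySem.List.pyRange 1 (((matrix.headD []).length : Int) - 1) 1).map (fun j => (i, j))) := by
  unfold pvGetCenterZone
  simp only [PySem.List.foldl_append_if, PySem.List.foldl_append_eq_flatMap, List.nil_append]
  set R : Int := (matrix.length : Int) with hRdef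
  set C : Int := ((matrix.headD []).length : Int) with hCdef
  have body : ∀ i : Int, i ∈ PySem.List.pyRange 0 R 1 →
      ((PySem.List.pyRange 0 (PySem.List.len (PySem.List.pyGetD matrix i [])) 1).filter
          (fun j => pvIsCenter (i, j) matrix)).map (fun j => (i, j)) =
        (if 1 ≤ i ∧ i < R - 1 then
          (PySem.List.pyRange 1 (C - 1) 1).map (fun j => (i, j)) else []) := by
    intro i hi
    rw [PySem.List.mem_pyRange_one] at hi
    have hlen : C - 1 ≤ PySem.List.len (PySem.List.pyGetD matrix i []) := by
      rw [PySem.List.pyGetD_of_nonneg _ _ hi.1, PySem.List.len_eq]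
      have hmem : matrix.getD i.toNat [] ∈ matrix := by
        rw [List.getD_eq_getElem?_getD, List.getElem?_eq_getElem (by omega)]
        exact List.getElem_mem _
      have := hrow _ hmem
      omega
    by_cases hint : 1 ≤ i ∧ i < R - 1
    · rw [if_pos hint]
      congr 1
      have : (fun j => pvIsCenter (i, j) matrix) =
          (fun j => decide (1 ≤ j ∧ j < C - 1)) := by
        funext j
        rw [pvIsCenter_eq]
        simp only [hint.1, hint.2, true_and, ← hRdef, ← hCdef]
      rw [this, filter_pyRange_interval _ _ _ (by omega) (by omega)]
    · rw [if_neg hint, List.map_eq_nil_iff, List.filter_eq_nil_iff]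
      intro j hj
      rw [pvIsCenter_eq]
      simp
      omega
  refine (List.flatMap_congr body).trans ?_
  rw [PySem.List.pyRange_one_append 0 1 R (by omega) (by omega),
    PySem.List.pyRange_one_append 1 (R - 1) R (by omega) (by omega),
    List.flatMap_append, List.flatMap_append]
  have left : (PySem.List.pyRange 0 1 1).flatMap
      (fun i => if 1 ≤ i ∧ i < R - 1 then (PySem.List.pyRange 1 (C - 1) 1).map (fun j => (i, j)) else []) = [] := by
    rw [List.flatMap_eq_nil_iff]
    intro i hi
    rw [PySem.List.mem_pyRange_one] at hi
    rw [if_neg (by omega)]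
  have right : (PySem.List.pyRange (R - 1) R 1).flatMap
      (fun i => if 1 ≤ i ∧ i < R - 1 then (PySem.List.pyRange 1 (C - 1) 1).map (fun j => (i, j)) else []) = [] := by
    rw [List.flatMap_eq_nil_iff]
    intro i hi
    rw [PySem.List.mem_pyRange_one] at hi
    rw [if_neg (by omega)]
  rw [left, right, List.nil_append, List.append_nil]
  apply List.flatMap_congr
  intro i hi
  rw [PySem.List.mem_pyRange_one] at hi
  rw [if_pos (by omega)]

-- the center zone is empty when the matrix is too small
theorem centerZone_nil (matrix : List (List Int))
    (h : matrix.length < 3 ∨ (matrix.headD []).length < 3) :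
    pvGetCenterZone matrix = [] := by
  unfold pvGetCenterZone
  simp only [PySem.List.foldl_append_if, PySem.List.foldl_append_eq_flatMap, List.nil_append]
  rw [List.flatMap_eq_nil_iff]
  intro i hi
  rw [List.map_eq_nil_iff, List.filter_eq_nil_iff]
  intro j hj
  rw [pvIsCenter_eq]
  simp at h ⊢
  omega

-- per-cell value: A's 3x3 threat level equals B's three table lookups
theorem cell_eq (matrix : List (List Int)) (a b : Nat)
    (ha : a + 2 < matrix.length) (hb : b < (matrix.headD []).length - 2) :
    pvGetThreatLevel (pvGetSubmatrix matrix (1 + (a : Int)) (1 + (b : Int))) =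
      (((matrix.map (fun row =>
          (List.range ((matrix.headD []).length - 2)).map
            (fun j => row.getD j 0 + row.getD (j + 1) 0 + row.getD (j + 2) 0))).getD a []).getD b 0 +
        ((matrix.map (fun row =>
          (List.range ((matrix.headD []).length - 2)).map
            (fun j => row.getD j 0 + row.getD (j + 1) 0 + row.getD (j + 2) 0))).getD (a + 1) []).getD b 0 +
        ((matrix.map (fun row =>
          (List.range ((matrix.headD []).length - 2)).map
            (fun j => row.getD j 0 + row.getD (j + 1) 0 + row.getD (j + 2) 0))).getD (a + 2) []).getD b 0) := by
  have hoff : PySem.Int.floordiv 3 2 = 1 := by decide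
  have h3a : (1 : Int) + a + 1 + 1 = (1 + (a:Int) - 1) + 3 := by ring
  have h3b : (1 : Int) + b + 1 + 1 = (1 + (b:Int) - 1) + 3 := by ring
  unfold pvGetSubmatrix pvGetThreatLevel
  simp only [hoff]
  rw [h3a, h3b, pyRange_three, pyRange_three]
  have gmap : ∀ (f : List Int → List Int) (k : Nat), k < matrix.length →
      (matrix.map f).getD k [] = f (matrix.getD k []) := by
    intro f k h
    rw [List.getD_eq_getElem?_getD, List.getElem?_map, List.getElem?_eq_getElem h]
    simp [List.getD_eq_getElem?_getD, List.getElem?_eq_getElem h]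
  have tbl : ∀ k : Nat, k < matrix.length →
      ((matrix.map (fun row =>
          (List.range ((matrix.headD []).length - 2)).map
            (fun j => row.getD j 0 + row.getD (j + 1) 0 + row.getD (j + 2) 0))).getD k []).getD b 0 =
        (matrix.getD k []).getD b 0 + (matrix.getD k []).getD (b + 1) 0 + (matrix.getD k []).getD (b + 2) 0 := by
    intro k hk
    rw [gmap _ k hk, PySem.List.getD_map_range _ _ _ _ hb]
  rw [tbl a (by omega), tbl (a + 1) (by omega), tbl (a + 2) (by omega)]
  simp only [List.foldl_cons, List.foldl_nil, List.nil_append]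
  rw [show (1:Int) + (a:Int) - 1 = ((a : Nat) : Int) from by omega]
  rw [show ((a:Nat):Int) + 1 = ((a + 1 : Nat) : Int) from by omega]
  rw [show ((a:Nat):Int) + 2 = ((a + 2 : Nat) : Int) from by omega]
  rw [show (1:Int) + (b:Int) - 1 = ((b : Nat) : Int) from by omega]
  rw [show ((b:Nat):Int) + 1 = ((b + 1 : Nat) : Int) from by omega]
  rw [show ((b:Nat):Int) + 2 = ((b + 2 : Nat) : Int) from by omega]
  simp only [PySem.List.pyGetD_natCast]
  simp [List.foldl]
  ring

-- ===== VERDICT (by name: the statement is the Claim_ definition above) =====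
theorem threat_to_city_spec : Claim_equal_threat_to_city := by
  unfold Claim_equal_threat_to_city Spec_threat_to_city
  intro matrix _ hpre
  unfold threat_to_city
  simp only [PySem.List.foldl_append_singleton_eq_map, List.nil_append]
  by_cases hsmall : matrix.length < 3 ∨ (matrix.headD []).length < 3
  · rw [centerZone_nil matrix hsmall]
    unfold threat_to_city_alt
    rw [if_pos hsmall]
    rfl
  · rw [not_or] at hsmall
    have hrow : ∀ row ∈ matrix, (matrix.headD []).length ≤ row.length := by
      rcases hpre with h | h | h
      · omega
      · omega
      · exact h
    rw [centerZone_eq matrix (by omega) hrow, List.map_flatMap]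
    unfold threat_to_city_alt
    rw [if_neg (by omega)]
    simp only [List.range'_eq_map_range, List.flatMap_map, List.map_map]
    rw [PySem.List.pyRange_one 1 ((matrix.length : Int) - 1)]
    rw [show ((matrix.length : Int) - 1 - 1).toNat = matrix.length - 2 from by omega]
    rw [List.flatMap_map]
    apply List.flatMap_congr
    intro a hax
    rw [List.mem_range] at hax
    rw [PySem.List.pyRange_one 1 (((matrix.headD []).length : Int) - 1)]
    rw [show (((matrix.headD []).length : Int) - 1 - 1).toNat = (matrix.headD []).length - 2 from
      by omega]
    rw [List.map_map]
    apply List.map_eq_map_iff.mpr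
    intro b hbx
    rw [List.mem_range] at hbx
    simp only [Function.comp]
    refine Prod.ext ?_ (Prod.ext ?_ ?_)
    · show (1 : Int) + (a : Int) = ((1 + a : Nat) : Int)
      omega
    · show (1 : Int) + (b : Int) = ((1 + b : Nat) : Int)
      omega
    · show pvGetThreatLevel (pvGetSubmatrix matrix (1 + (a : Int)) (1 + (b : Int))) = _
      rw [cell_eq matrix a b (by omega) hbx]
      rw [show 1 + a - 1 = a from by omega, show 1 + b - 1 = b from by omega,
        show 1 + a + 1 = a + 2 from by omega, show 1 + a = a + 1 from by omega]
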